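-- pv_equiv track=rewrite | github.com/peterqliu/fathom | pdf_utils.py | _process_page_text
-- ===== SOURCE A (Python) =====
-- def combine_short_sentences_with_subindices(sentences_with_subindices, min_length=20):
--     """
--     Combines short sentences while preserving the original sub-index of the first sentence in a combination.
--
--     Args:
--         sentences_with_subindices (list): A list of (sentence_text, original_sub_index) tuples.
--         min_length (int): The minimum length for a sentence to not be combined.
--
--     Returns:
--         list: A list of (combined_sentence_text, original_sub_index_of_first_part) tuples.
--     """
--     if not sentences_with_subindices:
--         return []
--
--     result = []
--     i = 0
--     while i < len(sentences_with_subindices):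
--         current_text, first_sub_idx_in_group = sentences_with_subindices[i]
--
--         # Pointer for combining subsequent sentences
--         next_item_idx = i + 1
--         # Keep combining with next sentences until we reach minimum length or run out of sentences
--         while len(current_text) < min_length and next_item_idx < len(sentences_with_subindices):
--             next_text, _ = sentences_with_subindices[next_item_idx]
--             current_text += " " + next_text
--             next_item_idx += 1
--
--         result.append((current_text, first_sub_idx_in_group))
--         i = next_item_idx # Move main iterator to the start of the next unprocessed sentence
--
--     return result
--
-- def _process_page_text(sentences_with_subindices_on_page, current_page_actual_index, incoming_fragment_text, incoming_fragment_page_index, incoming_fragment_sub_index):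
--     """
--     Processes sentences from a single page, handling incoming fragments and identifying outgoing ones.
--
--     Args:
--         sentences_with_subindices_on_page (list): List of (text, original_sub_idx) for the current page.
--         current_page_actual_index (int): The 0-based index of the current page.
--         incoming_fragment_text (str): Fragment text from the previous page.
--         incoming_fragment_page_index (int): Original page index of the incoming fragment.
--         incoming_fragment_sub_index (int): Original sub-index of the incoming fragment.
--
--     Returns:
--         tuple: (list_of_processed_sentences, outgoing_fragment_details_tuple)
--                list_of_processed_sentences is a list of (sentence_text, page_index, sub_index) tuples.
--                outgoing_fragment_details_tuple is (text, page_idx, sub_idx) for the next page.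
--     """
--     processed_sentences_list = []
--     process_list = list(sentences_with_subindices_on_page) # Make a mutable copy
--
--     # 1. Handle incoming fragment
--     if incoming_fragment_text:
--         if process_list: # If current page has content to combine with
--             first_sentence_text, _ = process_list[0]
--             combined_sentence = incoming_fragment_text + " " + first_sentence_text
--             processed_sentences_list.append((combined_sentence, incoming_fragment_page_index, incoming_fragment_sub_index))
--             process_list.pop(0) # Consumed the first sentence of the current page
--         else: # Current page is empty, add the incoming fragment as is
--             processed_sentences_list.append((incoming_fragment_text, incoming_fragment_page_index, incoming_fragment_sub_index))
--
--     # 2. Identify potential new fragment from the *end* of the current page's remaining content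
--     outgoing_fragment_text = ""
--     outgoing_fragment_page_index = -1
--     outgoing_fragment_sub_index = -1
--
--     if process_list:
--         original_last_text_if_present, original_last_sub_idx_if_present = sentences_with_subindices_on_page[-1]
--         # Check if the last item in process_list is indeed the original last sentence of the page
--         # (it might not be if the original list was short and parts were consumed by incoming fragment)
--         if process_list[-1][0] == original_last_text_if_present and process_list[-1][1] == original_last_sub_idx_if_present:
--             if not original_last_text_if_present.strip().endswith(('.', '?', '!')):
--                 outgoing_fragment_text = original_last_text_if_present
--                 outgoing_fragment_page_index = current_page_actual_index
--                 outgoing_fragment_sub_index = original_last_sub_idx_if_present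
--                 process_list.pop() # Remove it from list to be processed now
--
--     # 3. Combine and add remaining sentences on the current page
--     if process_list:
--         combined_sentences_tuples = combine_short_sentences_with_subindices(process_list)
--         for sentence, first_sub_idx in combined_sentences_tuples:
--             processed_sentences_list.append((sentence, current_page_actual_index, first_sub_idx))
--
--     return processed_sentences_list, (outgoing_fragment_text, outgoing_fragment_page_index, outgoing_fragment_sub_index)
-- ===== SOURCE B (Python) =====
-- def _combine(pairs, min_length=20):
--     # Precompute prefix sums of (len(text)+1); the group starting at i ends just
--     # before the first m > i with P[m] - P[i] - 1 >= min_length, found by binary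
--     # search, and the group's text is a single join of the slice.
--     n = len(pairs)
--     P = [0]
--     for text, _ in pairs:
--         P.append(P[-1] + len(text) + 1)
--     out = []
--     i = 0
--     while i < n:
--         target = P[i] + min_length + 1
--         lo, hi = i + 1, n
--         while lo < hi:
--             mid = (lo + hi) // 2
--             if P[mid] < target:
--                 lo = mid + 1
--             else:
--                 hi = mid
--         m = lo
--         out.append((" ".join(t for t, _ in pairs[i:m]), pairs[i][1]))
--         i = m
--     return out
--
--
-- def _process_page_text(sentences_with_subindices_on_page, current_page_actual_index, incoming_fragment_text, incoming_fragment_page_index, incoming_fragment_sub_index):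
--     out = []
--     rest = list(sentences_with_subindices_on_page)
--     if incoming_fragment_text:
--         if rest:
--             head_text, _ = rest.pop(0)
--             out.append((incoming_fragment_text + " " + head_text,
--                         incoming_fragment_page_index, incoming_fragment_sub_index))
--         else:
--             out.append((incoming_fragment_text,
--                         incoming_fragment_page_index, incoming_fragment_sub_index))
--     frag = ("", -1, -1)
--     if rest and rest[-1] == sentences_with_subindices_on_page[-1] \
--             and not rest[-1][0].strip().endswith(('.', '?', '!')):
--         last_text, last_idx = rest.pop()
--         frag = (last_text, current_page_actual_index, last_idx)
--     out.extend((t, current_page_actual_index, i) for t, i in _combine(rest))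
--     return out, frag
-- ===== Notes on version B (the rewrite author's own statement) =====
-- stated objective: alternative
-- what changed: combine_short_sentences_with_subindices is replaced by a prefix-sum-of-lengths array plus binary search for each group's end and a single join of the slice, instead of the nested while loop that grows the current string one sentence at a time; repeated string concatenation disappears.
import Mathlib
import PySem

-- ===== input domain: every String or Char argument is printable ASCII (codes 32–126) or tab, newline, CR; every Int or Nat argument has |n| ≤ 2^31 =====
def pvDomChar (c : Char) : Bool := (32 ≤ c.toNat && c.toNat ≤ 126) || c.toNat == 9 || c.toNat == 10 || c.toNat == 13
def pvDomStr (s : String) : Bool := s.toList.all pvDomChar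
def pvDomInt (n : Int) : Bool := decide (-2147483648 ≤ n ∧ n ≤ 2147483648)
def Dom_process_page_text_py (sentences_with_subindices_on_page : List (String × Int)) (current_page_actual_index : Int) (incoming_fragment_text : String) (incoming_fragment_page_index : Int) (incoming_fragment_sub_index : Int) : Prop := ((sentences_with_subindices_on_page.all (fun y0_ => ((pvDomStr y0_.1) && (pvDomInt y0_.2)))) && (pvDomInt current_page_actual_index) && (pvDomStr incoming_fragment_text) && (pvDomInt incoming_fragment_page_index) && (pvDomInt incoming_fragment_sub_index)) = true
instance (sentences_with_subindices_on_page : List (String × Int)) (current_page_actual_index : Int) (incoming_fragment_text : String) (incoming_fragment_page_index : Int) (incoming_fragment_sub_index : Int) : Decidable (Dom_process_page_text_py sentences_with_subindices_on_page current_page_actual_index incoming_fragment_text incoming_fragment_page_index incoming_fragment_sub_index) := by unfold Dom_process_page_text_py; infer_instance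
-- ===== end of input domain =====

-- B replaces the nested while-loop sentence grouping by a prefix-sum array of
-- text lengths, a binary search for each group's end, and one join per group;
-- objective: alternative algorithm.  Equivalence is proved on all inputs.

-- ===== PORT A =====
-- inner while loop of combine_short_sentences_with_subindices:
-- keep appending " " + next while len(current) < 20 and items remain
def pvInnerA (current : String) : List (String × Int) → String × List (String × Int)
  | [] => (current, [])
  | (t, i) :: tl =>
    if current.length < 20 then pvInnerA (current ++ " " ++ t) tl
    else (current, (t, i) :: tl)

theorem pvInnerA_len (c : String) (xs : List (String × Int)) :
    (pvInnerA c xs).2.length ≤ xs.length := by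
  induction xs generalizing c with
  | nil => simp [pvInnerA]
  | cons h tl ih =>
    obtain ⟨t, i⟩ := h
    simp only [pvInnerA]
    split
    · exact Nat.le_trans (ih _) (Nat.le_succ _)
    · simp

-- outer while loop of combine_short_sentences_with_subindices (i jumps to next_item_idx)
def pvCombineA : List (String × Int) → List (String × Int)
  | [] => []
  | (t, i) :: tl =>
    ((pvInnerA t tl).1, i) :: pvCombineA (pvInnerA t tl).2
termination_by xs => xs.length
decreasing_by
  exact Nat.lt_succ_of_le (pvInnerA_len t tl)

-- the three steps of _process_page_text
def process_page_text_py (sentences_with_subindices_on_page : List (String × Int)) (current_page_actual_index : Int) (incoming_fragment_text : String) (incoming_fragment_page_index : Int) (incoming_fragment_sub_index : Int) : (List (String × Int × Int)) × (String × Int × Int) :=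
  -- 1. handle incoming fragment (consumes the first sentence if present)
  let step1 : List (String × Int × Int) × List (String × Int) :=
    if incoming_fragment_text = "" then ([], sentences_with_subindices_on_page)
    else
      match sentences_with_subindices_on_page with
      | [] => ([(incoming_fragment_text, incoming_fragment_page_index, incoming_fragment_sub_index)], [])
      | (ft, _) :: tl =>
        ([(incoming_fragment_text ++ " " ++ ft, incoming_fragment_page_index, incoming_fragment_sub_index)], tl)
  let processed := step1.1
  let process_list := step1.2
  -- 2. identify the outgoing fragment at the end of the page
  let step2 : (String × Int × Int) × List (String × Int) :=
    match process_list.getLast? with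
    | none => (("", -1, -1), process_list)
    | some (lt, li) =>
      match sentences_with_subindices_on_page.getLast? with
      | none => (("", -1, -1), process_list)  -- unreachable: process_list ≠ [] forces the page ≠ []
      | some (olt, oli) =>
        if lt = olt ∧ li = oli then
          if PySem.Str.endswith (PySem.Str.strip olt) "." ∨
             PySem.Str.endswith (PySem.Str.strip olt) "?" ∨
             PySem.Str.endswith (PySem.Str.strip olt) "!" then
            (("", -1, -1), process_list)
          else ((olt, current_page_actual_index, oli), process_list.dropLast)
        else (("", -1, -1), process_list)
  -- 3. combine and tag the remaining sentences
  (processed ++ (pvCombineA step2.2).map (fun p => (p.1, current_page_actual_index, p.2)), step2.1)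

-- ===== PORT B =====
-- P = [0]; for text, _ in pairs: P.append(P[-1] + len(text) + 1)
def pvPrefixFrom (acc : Nat) : List (String × Int) → List Nat
  | [] => [acc]
  | (t, _) :: tl => acc :: pvPrefixFrom (acc + t.length + 1) tl

-- the inner binary-search loop of B (bisect_left on the prefix array).
-- fuel (hi - lo at the call) is a totality guard only: each step halves hi - lo
def pvBisect (P : List Nat) (target : Nat) : Nat → Nat → Nat → Nat
  | lo, _, 0 => lo
  | lo, hi, fuel + 1 =>
    if lo < hi then
      if P.getD ((lo + hi) / 2) 0 < target then pvBisect P target ((lo + hi) / 2 + 1) hi fuel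
      else pvBisect P target lo ((lo + hi) / 2) fuel
    else lo

-- " ".join
def pvJoinSp : List String → String
  | [] => ""
  | [t] => t
  | t :: tl => t ++ " " ++ pvJoinSp tl

-- outer while loop of B: jump i to the binary-search result m, join the slice.
-- fuel (pairs.length at the top call) is a totality guard only: the search
-- result is ≥ i + 1, so the loop runs out of indices before it runs out of fuel
def pvOuterB (pairs : List (String × Int)) (P : List Nat) : Nat → Nat → List (String × Int)
  | 0, _ => []
  | fuel + 1, i =>
    if i < pairs.length then
      let m := pvBisect P (P.getD i 0 + 21) (i + 1) pairs.length (pairs.length - (i + 1))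
      (pvJoinSp (((pairs.drop i).take (m - i)).map Prod.fst), (pairs.getD i ("", 0)).2)
        :: pvOuterB pairs P fuel m
    else []

def pvCombineB (pairs : List (String × Int)) : List (String × Int) :=
  pvOuterB pairs (pvPrefixFrom 0 pairs) pairs.length 0

def process_page_text_py_alt (sentences_with_subindices_on_page : List (String × Int)) (current_page_actual_index : Int) (incoming_fragment_text : String) (incoming_fragment_page_index : Int) (incoming_fragment_sub_index : Int) : (List (String × Int × Int)) × (String × Int × Int) :=
  -- incoming fragment: pop the head and glue it on
  let step1 : List (String × Int × Int) × List (String × Int) :=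
    if incoming_fragment_text = "" then ([], sentences_with_subindices_on_page)
    else
      match sentences_with_subindices_on_page with
      | [] => ([(incoming_fragment_text, incoming_fragment_page_index, incoming_fragment_sub_index)], [])
      | (ft, _) :: tl =>
        ([(incoming_fragment_text ++ " " ++ ft, incoming_fragment_page_index, incoming_fragment_sub_index)], tl)
  let out := step1.1
  let rest := step1.2
  -- outgoing fragment: pop the untouched, unterminated last sentence
  let step2 : (String × Int × Int) × List (String × Int) :=
    match rest.getLast? with
    | none => (("", -1, -1), rest)
    | some (lt, li) =>
      match sentences_with_subindices_on_page.getLast? with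
      | none => (("", -1, -1), rest)  -- unreachable: rest ≠ [] forces the page ≠ []
      | some (olt, oli) =>
        if lt = olt ∧ li = oli then
          if PySem.Str.endswith (PySem.Str.strip olt) "." ∨
             PySem.Str.endswith (PySem.Str.strip olt) "?" ∨
             PySem.Str.endswith (PySem.Str.strip olt) "!" then
            (("", -1, -1), rest)
          else ((olt, current_page_actual_index, oli), rest.dropLast)
        else (("", -1, -1), rest)
  (out ++ (pvCombineB step2.2).map (fun p => (p.1, current_page_actual_index, p.2)), step2.1)

-- ===== PRECONDITION & SPEC =====
def Spec_process_page_text_py (sentences_with_subindices_on_page : List (String × Int)) (current_page_actual_index : Int) (incoming_fragment_text : String) (incoming_fragment_page_index : Int) (incoming_fragment_sub_index : Int) (out : (List (String × Int × Int)) × (String × Int × Int)) : Prop := out = process_page_text_py_alt sentences_with_subindices_on_page current_page_actual_index incoming_fragment_text incoming_fragment_page_index incoming_fragment_sub_index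
instance (sentences_with_subindices_on_page : List (String × Int)) (current_page_actual_index : Int) (incoming_fragment_text : String) (incoming_fragment_page_index : Int) (incoming_fragment_sub_index : Int) (out : (List (String × Int × Int)) × (String × Int × Int)) : Decidable (Spec_process_page_text_py sentences_with_subindices_on_page current_page_actual_index incoming_fragment_text incoming_fragment_page_index incoming_fragment_sub_index out) := by unfold Spec_process_page_text_py; infer_instance

-- ===== CLAIM (what is proved, stated in full; the proofs are below) =====
def Claim_equal_process_page_text_py : Prop := ∀ (sentences_with_subindices_on_page : List (String × Int)) (current_page_actual_index : Int) (incoming_fragment_text : String) (incoming_fragment_page_index : Int) (incoming_fragment_sub_index : Int), Dom_process_page_text_py sentences_with_subindices_on_page current_page_actual_index incoming_fragment_text incoming_fragment_page_index incoming_fragment_sub_index → Spec_process_page_text_py sentences_with_subindices_on_page current_page_actual_index incoming_fragment_text incoming_fragment_page_index incoming_fragment_sub_index (process_page_text_py sentences_with_subindices_on_page current_page_actual_index incoming_fragment_text incoming_fragment_page_index incoming_fragment_sub_index)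

-- ===== LEMMAS AND PROOFS =====

-- sum of (len + 1) over a list of pairs
def pvSumLen (xs : List (String × Int)) : Nat := (xs.map (fun p => p.1.length + 1)).sum

-- number of items A's inner loop consumes, and the glued string it builds
def pvCnt (c : String) : List (String × Int) → Nat
  | [] => 0
  | (t, _) :: tl => if c.length < 20 then 1 + pvCnt (c ++ " " ++ t) tl else 0

def pvGlue (c : String) : List (String × Int) → String
  | [] => c
  | (t, _) :: tl => pvGlue (c ++ " " ++ t) tl

theorem pvInnerA_eq (xs : List (String × Int)) (c : String) :
    pvInnerA c xs = (pvGlue c (xs.take (pvCnt c xs)), xs.drop (pvCnt c xs)) := by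
  induction xs generalizing c with
  | nil => simp [pvInnerA, pvCnt, pvGlue]
  | cons p tl ih =>
    obtain ⟨t, i⟩ := p
    by_cases h : c.length < 20
    · simp [pvInnerA, pvCnt, h, ih, Nat.one_add, pvGlue]
    · simp [pvInnerA, pvCnt, pvGlue, h]

theorem pvCnt_le (c : String) (xs : List (String × Int)) : pvCnt c xs ≤ xs.length := by
  induction xs generalizing c with
  | nil => simp [pvCnt]
  | cons p tl ih =>
    obtain ⟨t, i⟩ := p
    by_cases h : c.length < 20
    · have := ih (c ++ " " ++ t)
      simp only [pvCnt, if_pos h, List.length_cons]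
      omega
    · simp [pvCnt, h]

theorem pvSpLen : (" " : String).length = 1 := rfl

theorem pvGlue_append (a b : String) (xs : List (String × Int)) :
    pvGlue (a ++ b) xs = a ++ pvGlue b xs := by
  induction xs generalizing b with
  | nil => simp [pvGlue]
  | cons p tl ih =>
    obtain ⟨t, i⟩ := p
    simp only [pvGlue, String.append_assoc, ih]

theorem pvJoinSp_glue (c : String) (xs : List (String × Int)) :
    pvJoinSp (c :: xs.map Prod.fst) = pvGlue c xs := by
  induction xs generalizing c with
  | nil => simp [pvJoinSp, pvGlue]
  | cons p tl ih =>
    obtain ⟨t, i⟩ := p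
    have h2 : pvGlue (c ++ " " ++ t) tl = c ++ " " ++ pvGlue t tl :=
      pvGlue_append (c ++ " ") t tl
    calc pvJoinSp (c :: (t, i).fst :: tl.map Prod.fst)
        = c ++ " " ++ pvJoinSp ((t, i).fst :: tl.map Prod.fst) := by
          simp only [pvJoinSp]
      _ = c ++ " " ++ pvGlue t tl := by rw [ih]
      _ = pvGlue c ((t, i) :: tl) := by simp only [pvGlue, h2]

-- pvCnt stops exactly at the length-20 threshold
theorem pvCnt_lt' (c : String) (xs : List (String × Int)) :
    ∀ j < pvCnt c xs, c.length + pvSumLen (xs.take j) < 20 := by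
  induction xs generalizing c with
  | nil => simp [pvCnt]
  | cons p tl ih =>
    obtain ⟨t, i⟩ := p
    intro j hj
    by_cases h : c.length < 20
    · simp only [pvCnt, if_pos h] at hj
      cases j with
      | zero => simp [pvSumLen]; omega
      | succ j' =>
        have := ih (c ++ " " ++ t) j' (by omega)
        simp [pvSumLen, String.length_append, pvSpLen] at this ⊢
        omega
    · simp [pvCnt, h] at hj

theorem pvCnt_ge (c : String) (xs : List (String × Int)) :
    pvCnt c xs < xs.length → 20 ≤ c.length + pvSumLen (xs.take (pvCnt c xs)) := by
  induction xs generalizing c with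
  | nil => simp
  | cons p tl ih =>
    obtain ⟨t, i⟩ := p
    by_cases h : c.length < 20
    · simp only [pvCnt, if_pos h, List.length_cons]
      intro hk
      have := ih (c ++ " " ++ t) (by omega)
      simp [pvSumLen, String.length_append, pvSpLen, Nat.one_add] at this ⊢
      omega
    · intro _
      simp [pvCnt, h, pvSumLen]
      omega

theorem pvSumLen_append (a b : List (String × Int)) :
    pvSumLen (a ++ b) = pvSumLen a + pvSumLen b := by
  simp [pvSumLen]

-- prefix-array values are the partial sums
theorem pvPrefixFrom_getD (a : Nat) (xs : List (String × Int)) :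
    ∀ k ≤ xs.length, (pvPrefixFrom a xs).getD k 0 = a + pvSumLen (xs.take k) := by
  induction xs generalizing a with
  | nil =>
    intro k hk
    have : k = 0 := by simpa using hk
    subst this
    simp [pvPrefixFrom, pvSumLen]
  | cons p tl ih =>
    obtain ⟨t, i⟩ := p
    intro k hk
    cases k with
    | zero => simp [pvPrefixFrom, pvSumLen]
    | succ k' =>
      have := ih (a + t.length + 1) k' (by simpa using hk)
      simp [pvPrefixFrom, pvSumLen] at this ⊢
      omega

theorem pvBisect_lb (P : List Nat) (target : Nat) :
    ∀ fuel lo hi, lo ≤ pvBisect P target lo hi fuel := by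
  intro fuel
  induction fuel with
  | zero => intro lo hi; exact Nat.le_refl lo
  | succ fuel ih =>
    intro lo hi
    simp only [pvBisect]
    split
    · split
      · have := ih ((lo + hi) / 2 + 1) hi
        omega
      · exact ih lo ((lo + hi) / 2)
    · exact Nat.le_refl lo

-- specification of the binary search on a monotone prefix array
theorem pvBisect_spec (P : List Nat) (t : Nat) :
    ∀ fuel lo hi, lo ≤ hi → hi - lo ≤ fuel →
    (∀ j k, j ≤ k → k < hi → P.getD j 0 ≤ P.getD k 0) →
    pvBisect P t lo hi fuel ≤ hi ∧
    (∀ k, lo ≤ k → k < pvBisect P t lo hi fuel → P.getD k 0 < t) ∧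
    (pvBisect P t lo hi fuel < hi → t ≤ P.getD (pvBisect P t lo hi fuel) 0) := by
  intro fuel
  induction fuel with
  | zero =>
    intro lo hi hlh hfuel hmono
    have : hi = lo := by omega
    subst this
    simp only [pvBisect]
    exact ⟨Nat.le_refl _, by omega, by omega⟩
  | succ fuel ih =>
    intro lo hi hlh hfuel hmono
    simp only [pvBisect]
    by_cases hlt : lo < hi
    · rw [if_pos hlt]
      by_cases hPm : P.getD ((lo + hi) / 2) 0 < t
      · rw [if_pos hPm]
        obtain ⟨h1, h2, h3⟩ := ih ((lo + hi) / 2 + 1) hi (by omega) (by omega) hmono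
        refine ⟨h1, ?_, h3⟩
        intro k hk1 hk2
        by_cases hk : (lo + hi) / 2 + 1 ≤ k
        · exact h2 k hk hk2
        · exact Nat.lt_of_le_of_lt (hmono k ((lo + hi) / 2) (by omega) (by omega)) hPm
      · rw [if_neg hPm]
        obtain ⟨h1, h2, h3⟩ := ih lo ((lo + hi) / 2) (by omega) (by omega)
          (fun j k hj hk => hmono j k hj (by omega))
        refine ⟨by omega, h2, ?_⟩
        intro hr
        by_cases hr2 : pvBisect P t lo ((lo + hi) / 2) fuel < (lo + hi) / 2
        · exact h3 hr2
        · have he : pvBisect P t lo ((lo + hi) / 2) fuel = (lo + hi) / 2 := by omega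
          rw [he]
          omega
    · rw [if_neg hlt]
      exact ⟨by omega, by omega, by omega⟩

-- the binary search lands exactly where A's inner loop stops
theorem pvBisect_eq_cnt (pairs : List (String × Int)) (i : Nat) (h : i < pairs.length)
    (t : String) (idx : Int) (hget : pairs.drop i = (t, idx) :: pairs.drop (i + 1)) :
    pvBisect (pvPrefixFrom 0 pairs) ((pvPrefixFrom 0 pairs).getD i 0 + 21) (i + 1) pairs.length
        (pairs.length - (i + 1))
      = i + 1 + pvCnt t (pairs.drop (i + 1)) := by
  set P := pvPrefixFrom 0 pairs with hP
  set n := pairs.length with hn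
  have hmono : ∀ j k, j ≤ k → k < n → P.getD j 0 ≤ P.getD k 0 := by
    intro j k hjk hk
    rw [hP, pvPrefixFrom_getD 0 pairs j (by omega), pvPrefixFrom_getD 0 pairs k (by omega)]
    have htt : pairs.take j = (pairs.take k).take j := by
      rw [List.take_take, min_eq_left hjk]
    have := List.take_append_drop j (pairs.take k)
    calc 0 + pvSumLen (pairs.take j)
        ≤ 0 + (pvSumLen ((pairs.take k).take j) + pvSumLen ((pairs.take k).drop j)) := by
          rw [← htt]; omega
      _ = 0 + pvSumLen (pairs.take k) := by rw [← pvSumLen_append, this]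
  obtain ⟨h1, h2, h3⟩ := pvBisect_spec P (P.getD i 0 + 21) (n - (i + 1)) (i + 1) n
    (by omega) (by omega) hmono
  set r := pvBisect P (P.getD i 0 + 21) (i + 1) n (n - (i + 1)) with hr
  have hrlb := pvBisect_lb P (P.getD i 0 + 21) (n - (i + 1)) (i + 1) n
  set k0 := pvCnt t (pairs.drop (i + 1)) with hk0
  have hk0le : k0 ≤ (pairs.drop (i + 1)).length := pvCnt_le _ _
  have hdlen : (pairs.drop (i + 1)).length = n - (i + 1) := by
    rw [List.length_drop]
  -- translation: for i + 1 ≤ m ≤ n,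
  --   P[m] = P[i] + (len t + 1) + pvSumLen (first (m - (i+1)) items after position i)
  have htrans : ∀ m, i + 1 ≤ m → m ≤ n → P.getD m 0 =
      P.getD i 0 + (t.length + 1) + pvSumLen ((pairs.drop (i + 1)).take (m - (i + 1))) := by
    intro m hm1 hm2
    obtain ⟨q, rfl⟩ : ∃ q, m = i + 1 + q := ⟨m - (i + 1), by omega⟩
    rw [hP, pvPrefixFrom_getD 0 pairs (i + 1 + q) (by omega), pvPrefixFrom_getD 0 pairs i (by omega)]
    have hsplit1 : pairs.take (i + 1 + q) = pairs.take (i + 1) ++ (pairs.drop (i + 1)).take q := by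
      rw [List.take_add]
    have hsplit2 : pairs.take (i + 1) = pairs.take i ++ [(t, idx)] := by
      rw [List.take_add, hget]
      simp
    rw [Nat.add_sub_cancel_left, hsplit1, hsplit2, pvSumLen_append, pvSumLen_append]
    simp [pvSumLen]
  -- antisymmetry
  have hle1 : r ≤ i + 1 + k0 := by
    by_contra hc
    have hk0n : i + 1 + k0 < n := by omega
    have hge := pvCnt_ge t (pairs.drop (i + 1)) (by omega)
    rw [← hk0] at hge
    have h2' := h2 (i + 1 + k0) (by omega) (by omega)
    rw [htrans (i + 1 + k0) (by omega) (by omega), Nat.add_sub_cancel_left] at h2'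
    omega
  have hle2 : i + 1 + k0 ≤ r := by
    by_contra hc
    have hrn : r < n := by omega
    have h3' := h3 hrn
    rw [htrans r (by omega) (by omega)] at h3'
    have hlt := pvCnt_lt' t (pairs.drop (i + 1)) (r - (i + 1)) (by omega)
    omega

  omega

-- one unfolding step of B's outer loop (with the let for m zeta-reduced)
theorem pvOuterB_step (pairs : List (String × Int)) (P : List Nat) (fuel i : Nat)
    (h : i < pairs.length) :
    pvOuterB pairs P (fuel + 1) i =
      (pvJoinSp (((pairs.drop i).take
          (pvBisect P (P.getD i 0 + 21) (i + 1) pairs.length (pairs.length - (i + 1)) - i)).map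
            Prod.fst),
        (pairs.getD i ("", 0)).2)
        :: pvOuterB pairs P fuel
            (pvBisect P (P.getD i 0 + 21) (i + 1) pairs.length (pairs.length - (i + 1))) := by
  rw [pvOuterB, if_pos h]

-- A's outer loop on the suffix from i equals B's outer loop started at index i
theorem pvOuterB_eq (pairs : List (String × Int)) :
    ∀ fuel i, pairs.length - i ≤ fuel →
      pvOuterB pairs (pvPrefixFrom 0 pairs) fuel i = pvCombineA (pairs.drop i) := by
  intro d
  induction d with
  | zero =>
    intro i hi
    have hge : pairs.length ≤ i := by omega
    rw [pvOuterB, List.drop_of_length_le hge, pvCombineA]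
  | succ d' ih =>
    intro i hi
    by_cases h : i < pairs.length
    · have hget : pairs.drop i = pairs[i] :: pairs.drop (i + 1) :=
        List.drop_eq_getElem_cons h
      rcases hpi : pairs[i] with ⟨t, idx⟩
      rw [hpi] at hget
      have hm := pvBisect_eq_cnt pairs i h t idx hget
      set k0 := pvCnt t (pairs.drop (i + 1)) with hk0
      rw [pvOuterB_step pairs _ d' i h, hm]
      have hmi : i + 1 + k0 - i = k0 + 1 := by omega
      have htake : (pairs.drop i).take (k0 + 1) = (t, idx) :: (pairs.drop (i + 1)).take k0 := by
        rw [hget, List.take_succ_cons]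
      have hgd : pairs.getD i ("", 0) = (t, idx) := by
        rw [List.getD_eq_getElem _ _ h, hpi]
      have htail : pvOuterB pairs (pvPrefixFrom 0 pairs) d' (i + 1 + k0)
          = pvCombineA (pairs.drop (i + 1 + k0)) := by
        exact ih (i + 1 + k0) (by omega)
      have hdd : pairs.drop (i + 1 + k0) = (pairs.drop (i + 1)).drop k0 := by
        rw [List.drop_drop]
      rw [hmi, htake, hgd, htail, hdd, hget, pvCombineA, pvInnerA_eq, ← hk0]
      simp only [List.map_cons]
      rw [pvJoinSp_glue]
    · rw [pvOuterB, if_neg h, List.drop_of_length_le (by omega), pvCombineA]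

@[simp] theorem pvCombineB_eq (xs : List (String × Int)) : pvCombineB xs = pvCombineA xs := by
  have := pvOuterB_eq xs xs.length 0 (by omega)
  simpa [pvCombineB] using this

-- ===== VERDICT (by name: the statement is the Claim_ definition above) =====
theorem process_page_text_py_spec : Claim_equal_process_page_text_py := by
  intro s cp inc ipi isi _
  unfold Spec_process_page_text_py
  simp only [process_page_text_py, process_page_text_py_alt, pvCombineB_eq]
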